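-- pv_equiv track=rewrite | github.com/pukkapies/geninterp | geninterp/factors.py | prod_sum_divisible
-- ===== SOURCE A (Python) =====
-- import copy
--
-- def prod_div_rem(alist, divisor):
--     """
--     Calculates the remainder from dividing the product of elements in alist with divisor
--     The method used does not actually multiply out the elements of alist - the function is intended
--     to be used for situations where the product is very large
--     :param alist: a list of nonnegative integers
--     :param divisor: an integer
--     :return: the remainder
--     """
--     assert isinstance(alist, list)
--     for element in alist:
--         assert element >= 0
--     if len(alist) == 0:
--         return 0
--     elif len(alist) == 1:
--         return alist[0] % divisor
--     else:
--         answer = 0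
--         remainder1 = alist[0] % divisor
--         for i in range(1, len(alist)):
--             remainder2 = alist[i] % divisor
--             answer = (remainder1 * remainder2) % divisor
--             remainder1 = answer
--     return answer
--
-- def prod_sum_divisible(list_of_lists, divisor):
--     """
--     Calculates if sum of products in list_of_lists is divisible by divisor, without
--     multiplying out product terms (intended for large numbers)
--     :param list_of_lists: Each sublist represents a product
--     :param divisor: an integer
--     :return: Boolean
--     """
--     assert isinstance(list_of_lists, list)
--     lol_copy = copy.deepcopy(list_of_lists)
--     remainder = 0
--     for l in lol_copy:
--         # First check if all elements are nonnegative
--         sign = 1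
--         for index in range(len(l)):
--             if l[index] < 0:
--                 sign *= -1
--                 l[index] *= -1
--         if sign == 1:
--             remainder += prod_div_rem(l, divisor)
--         else:
--             remainder -= prod_div_rem(l, divisor)
--         remainder = remainder % divisor
--     return remainder == 0
-- ===== SOURCE B (Python) =====
-- def prod_sum_divisible(list_of_lists, divisor):
--     """Exact arithmetic: sum the full (big-int) products of the sublists and
--     take a single modulo at the end, instead of A's incremental modular
--     reduction with sign extraction and deepcopy.  An empty sublist
--     contributes 0, as specified by A's prod_div_rem."""
--     assert isinstance(list_of_lists, list)
--     total = 0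
--     for l in list_of_lists:
--         if l:
--             p = 1
--             for x in l:
--                 p *= x
--             total += p
--     return total % divisor == 0
-- ===== Notes on version B (the rewrite author's own statement) =====
-- stated objective: simpler
-- what changed: Replaces A's incremental modular arithmetic (deepcopy, per-sublist sign/abs rewriting pass, the prod_div_rem residue helper, a modulo after every sublist) with exact big-int products summed directly and one single modulo at the very end.
-- outside the precondition, e.g. on prod_sum_divisible([], 0): A returns True, B raises ZeroDivisionError
import Mathlib
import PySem

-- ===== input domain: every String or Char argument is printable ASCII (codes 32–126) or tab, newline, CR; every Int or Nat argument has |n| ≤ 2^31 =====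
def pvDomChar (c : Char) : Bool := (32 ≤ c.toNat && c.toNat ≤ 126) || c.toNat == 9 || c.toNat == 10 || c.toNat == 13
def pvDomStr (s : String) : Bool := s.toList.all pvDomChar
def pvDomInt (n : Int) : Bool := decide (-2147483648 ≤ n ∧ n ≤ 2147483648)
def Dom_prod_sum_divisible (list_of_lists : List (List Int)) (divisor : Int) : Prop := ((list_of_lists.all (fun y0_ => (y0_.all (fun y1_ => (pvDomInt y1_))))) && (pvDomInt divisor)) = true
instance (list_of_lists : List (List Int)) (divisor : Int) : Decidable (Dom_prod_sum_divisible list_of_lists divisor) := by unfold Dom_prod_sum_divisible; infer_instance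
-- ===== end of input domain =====

-- B: exact big-int sum of sublist products with a single final modulo, instead of A's
-- incremental modular reduction with deepcopy, sign extraction and the prod_div_rem helper
-- (simpler; not claimed faster).  A deepcopies its argument, so neither mutates it.


-- ===== PORT A =====
-- helper prod_div_rem: its asserts always pass at A's call sites (elements were made nonnegative)
def prod_div_rem (alist : List Int) (divisor : Int) : Int :=
  if alist.length = 0 then 0
  else if alist.length = 1 then PySem.Int.mod ((PySem.List.pyGet? alist 0).getD 0) divisor
  else
    let remainder1 := PySem.Int.mod ((PySem.List.pyGet? alist 0).getD 0) divisor
    -- for i in range(1, len(alist)): state (answer, remainder1); indices are in range so pyGet? never fails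
    let st := (PySem.List.pyRange 1 alist.length 1).foldl
      (fun (st : Int × Int) i =>
        let remainder2 := PySem.Int.mod ((PySem.List.pyGet? alist i).getD 0) divisor
        let answer := PySem.Int.mod (st.2 * remainder2) divisor
        (answer, answer)) (0, remainder1)
    st.1

def prod_sum_divisible (list_of_lists : List (List Int)) (divisor : Int) : Bool :=
  -- lol_copy = deepcopy(...); for l in lol_copy: sign/abs loop over indices, then ± prod_div_rem, then % divisor
  let remainder := list_of_lists.foldl
    (fun (remainder : Int) l =>
      let st := (PySem.List.pyRange 0 l.length 1).foldl
        (fun (st : Int × List Int) index =>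
          let v := (PySem.List.pyGet? st.2 index).getD 0
          if v < 0 then (st.1 * -1, st.2.set index.toNat (v * -1)) else st)
        (1, l)
      let r := prod_div_rem st.2 divisor
      let remainder := if st.1 = 1 then remainder + r else remainder - r
      PySem.Int.mod remainder divisor) 0
  remainder == 0

-- ===== PORT B =====
def prod_sum_divisible_alt (list_of_lists : List (List Int)) (divisor : Int) : Bool :=
  let total := list_of_lists.foldl
    (fun (total : Int) l =>
      if l.isEmpty then total
      else total + l.foldl (fun p x => p * x) 1) 0
  PySem.Int.mod total divisor == 0

-- ===== PRECONDITION & SPEC =====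
-- Pre_ excludes divisor == 0: there Python A raises ZeroDivisionError whenever list_of_lists is
-- nonempty, and on the single remaining input ([], 0) A returns True while B's one final modulo
-- raises ZeroDivisionError (B's own algorithm needs the division even for an empty list).
def Pre_prod_sum_divisible (list_of_lists : List (List Int)) (divisor : Int) : Prop :=
  divisor ≠ 0
instance (list_of_lists : List (List Int)) (divisor : Int) : Decidable (Pre_prod_sum_divisible list_of_lists divisor) := by unfold Pre_prod_sum_divisible; infer_instance
def pvWitness_prod_sum_divisible : List (List Int) × Int := ([[2, -3], [], [7]], 5)

def Spec_prod_sum_divisible (list_of_lists : List (List Int)) (divisor : Int) (out : Bool) : Prop := out = prod_sum_divisible_alt list_of_lists divisor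
instance (list_of_lists : List (List Int)) (divisor : Int) (out : Bool) : Decidable (Spec_prod_sum_divisible list_of_lists divisor out) := by unfold Spec_prod_sum_divisible; infer_instance

-- ===== CLAIM (what is proved, stated in full; the proofs are below) =====
def Claim_equal_prod_sum_divisible : Prop := ∀ (list_of_lists : List (List Int)) (divisor : Int), Dom_prod_sum_divisible list_of_lists divisor → Pre_prod_sum_divisible list_of_lists divisor → Spec_prod_sum_divisible list_of_lists divisor (prod_sum_divisible list_of_lists divisor)

-- ===== LEMMAS AND PROOFS =====

-- congruence toolkit for PySem.Int.mod (Python %): it only depends on the argument's residue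
theorem pv_mod_emod (a d : Int) : (PySem.Int.mod a d) % d = a % d := by
  have h := PySem.Int.floordiv_mul_add_mod a d
  have h2 : (PySem.Int.mod a d + d * PySem.Int.floordiv a d) % d = PySem.Int.mod a d % d :=
    Int.add_mul_emod_self_left _ _ _
  rw [show PySem.Int.mod a d + d * PySem.Int.floordiv a d = a by linarith] at h2
  exact h2.symm

theorem pv_mod_congr (a b d : Int) (h : a % d = b % d) : PySem.Int.mod a d = PySem.Int.mod b d := by
  rcases lt_trichotomy d 0 with hd | hd | hd
  · have h1 := PySem.Int.mod_neg_neg (-a) (-d)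
    have h2 := PySem.Int.mod_neg_neg (-b) (-d)
    simp only [neg_neg] at h1 h2
    have hn : (-a) % (-d) = (-b) % (-d) := by
      rw [Int.emod_neg, Int.emod_neg]
      exact Int.ModEq.neg h
    rw [h1, h2, PySem.Int.mod_eq_emod_of_pos (by omega : (0:Int) < -d),
        PySem.Int.mod_eq_emod_of_pos (by omega : (0:Int) < -d), hn]
  · subst hd
    simp only [Int.emod_zero] at h
    rw [h]
  · rw [PySem.Int.mod_eq_emod_of_pos hd, PySem.Int.mod_eq_emod_of_pos hd, h]

theorem pv_mod_mul_left (a b d : Int) :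
    PySem.Int.mod (PySem.Int.mod a d * b) d = PySem.Int.mod (a * b) d := by
  apply pv_mod_congr
  rw [Int.mul_emod, pv_mod_emod, ← Int.mul_emod]

theorem pv_mod_mul_right (a b d : Int) :
    PySem.Int.mod (a * PySem.Int.mod b d) d = PySem.Int.mod (a * b) d := by
  apply pv_mod_congr
  rw [Int.mul_emod, pv_mod_emod, ← Int.mul_emod]

theorem pv_mod_add_left (t x d : Int) :
    PySem.Int.mod (PySem.Int.mod t d + x) d = PySem.Int.mod (t + x) d := by
  apply pv_mod_congr
  rw [Int.add_emod, pv_mod_emod, ← Int.add_emod]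

theorem pv_mod_add_right (t x d : Int) :
    PySem.Int.mod (t + PySem.Int.mod x d) d = PySem.Int.mod (t + x) d := by
  apply pv_mod_congr
  rw [Int.add_emod, pv_mod_emod, ← Int.add_emod]

theorem pv_mod_sub_right (t x d : Int) :
    PySem.Int.mod (t - PySem.Int.mod x d) d = PySem.Int.mod (t - x) d := by
  apply pv_mod_congr
  rw [Int.sub_emod, pv_mod_emod, ← Int.sub_emod]

theorem pv_mod_zero_left (d : Int) : PySem.Int.mod 0 d = 0 := by
  rcases lt_trichotomy d 0 with hd | hd | hd
  · have h1 := PySem.Int.mod_neg_neg 0 (-d)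
    simp only [neg_neg, neg_zero] at h1
    rw [h1, PySem.Int.mod_eq_emod_of_pos (by omega : (0:Int) < -d)]
    simp
  · subst hd
    have h := PySem.Int.floordiv_mul_add_mod 0 0
    have h0 := pv_mod_emod 0 0
    simp at h0
    exact h0
  · rw [PySem.Int.mod_eq_emod_of_pos hd]; simp

-- sign and absolute value of a list (proof-side characterisation of A's index loop)
def pvSgn : List Int → Int
  | [] => 1
  | x :: r => (if x < 0 then -1 else 1) * pvSgn r

def pvAbs (l : List Int) : List Int := l.map (fun x => if x < 0 then -x else x)

theorem pvSgn_pm (l : List Int) : pvSgn l = 1 ∨ pvSgn l = -1 := by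
  induction l with
  | nil => left; rfl
  | cons x r ih =>
    simp only [pvSgn]
    rcases ih with h | h <;> rw [h] <;> split_ifs <;> simp

theorem pvSgn_mul_abs_prod (l : List Int) : pvSgn l * (pvAbs l).prod = l.prod := by
  induction l with
  | nil => simp [pvSgn, pvAbs]
  | cons x r ih =>
    simp only [pvSgn, pvAbs, List.map_cons, List.prod_cons] at *
    split_ifs with h
    · linear_combination x * ih
    · linear_combination x * ih

-- A's sign/abs index loop computes (pvSgn, pvAbs)
theorem pv_signloop (suf : List Int) : ∀ (pref : List Int) (s : Int),
    ((PySem.List.pyRange (pref.length : Int) ((pref.length + suf.length : Nat) : Int) 1).foldl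
      (fun (st : Int × List Int) index =>
        if (PySem.List.pyGet? st.2 index).getD 0 < 0 then
          (st.1 * -1, st.2.set index.toNat ((PySem.List.pyGet? st.2 index).getD 0 * -1))
        else st)
      (s, pref ++ suf)) = (s * pvSgn suf, pref ++ pvAbs suf) := by
  induction suf with
  | nil =>
    intro pref s
    rw [PySem.List.pyRange_one_eq_nil (by simp)]
    simp [pvSgn, pvAbs]
  | cons x rest ih =>
    intro pref s
    have hlt : (pref.length : Int) < ((pref.length + (x :: rest).length : Nat) : Int) := by
      simp only [List.length_cons]; omega
    rw [PySem.List.pyRange_one_cons hlt, List.foldl_cons]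
    have hget : (PySem.List.pyGet? (pref ++ x :: rest) (pref.length : Int)).getD 0 = x := by
      rw [PySem.List.pyGet?_append_length]; rfl
    by_cases hx : x < 0
    · rw [if_pos (by rw [hget]; exact hx)]
      have hset : (pref ++ x :: rest).set ((pref.length : Int)).toNat
          ((PySem.List.pyGet? (pref ++ x :: rest) (pref.length : Int)).getD 0 * -1)
          = (pref ++ [x * -1]) ++ rest := by
        rw [hget, Int.toNat_natCast, List.set_append_right _ _ (le_refl _)]
        simp
      rw [hset]
      have ihx := ih (pref ++ [x * -1]) (s * -1)
      have hlen : ((pref ++ [x * -1]).length : Int) = (pref.length : Int) + 1 := by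
        simp
      have hlen2 : (((pref ++ [x * -1]).length + rest.length : Nat) : Int)
          = ((pref.length + (x :: rest).length : Nat) : Int) := by
        simp [List.length_append, List.length_cons]; omega
      rw [hlen, hlen2] at ihx
      rw [ihx]
      simp only [Prod.mk.injEq]
      refine ⟨by simp only [pvSgn, if_pos hx]; ring, ?_⟩
      simp [pvAbs, hx, List.append_assoc]
    · rw [if_neg (by rw [hget]; exact hx)]
      have ihx := ih (pref ++ [x]) s
      have hlen : ((pref ++ [x]).length : Int) = (pref.length : Int) + 1 := by simp
      have hlen2 : (((pref ++ [x]).length + rest.length : Nat) : Int)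
          = ((pref.length + (x :: rest).length : Nat) : Int) := by
        simp [List.length_append, List.length_cons]; omega
      rw [hlen, hlen2] at ihx
      rw [show pref ++ x :: rest = (pref ++ [x]) ++ rest by simp, ihx]
      simp only [Prod.mk.injEq]
      refine ⟨by simp only [pvSgn, if_neg hx]; ring, ?_⟩
      simp [pvAbs, hx, List.append_assoc]

theorem pv_signloop0 (l : List Int) :
    ((PySem.List.pyRange 0 (l.length : Int) 1).foldl
      (fun (st : Int × List Int) index =>
        if (PySem.List.pyGet? st.2 index).getD 0 < 0 then
          (st.1 * -1, st.2.set index.toNat ((PySem.List.pyGet? st.2 index).getD 0 * -1))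
        else st)
      (1, l)) = (pvSgn l, pvAbs l) := by
  have h := pv_signloop l [] 1
  simpa using h

-- the remainder loop of prod_div_rem
theorem pv_pdr_loop (l : List Int) (d : Int) : ∀ (n k : Nat), n = l.length - k → k < l.length →
    ∀ (x r : Int),
    ((PySem.List.pyRange (k : Int) (l.length : Int) 1).foldl
      (fun (st : Int × Int) i =>
        (PySem.Int.mod (st.2 * PySem.Int.mod ((PySem.List.pyGet? l i).getD 0) d) d,
         PySem.Int.mod (st.2 * PySem.Int.mod ((PySem.List.pyGet? l i).getD 0) d) d)) (x, r))
    = (PySem.Int.mod (r * (l.drop k).prod) d, PySem.Int.mod (r * (l.drop k).prod) d) := by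
  intro n
  induction n with
  | zero => intro k hn hk; omega
  | succ n ihn =>
    intro k hn hk x r
    rw [PySem.List.pyRange_one_cons (by exact_mod_cast hk), List.foldl_cons]
    have hget : (PySem.List.pyGet? l (k : Int)).getD 0 = l[k] := by
      rw [PySem.List.pyGet?_natCast, List.getElem?_eq_getElem hk]; rfl
    have hdrop : l.drop k = l[k] :: l.drop (k + 1) := List.drop_eq_getElem_cons hk
    by_cases hk1 : k + 1 < l.length
    · have ihx := ihn (k + 1) (by omega) hk1
        (PySem.Int.mod (r * PySem.Int.mod ((PySem.List.pyGet? l (k : Int)).getD 0) d) d)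
        (PySem.Int.mod (r * PySem.Int.mod ((PySem.List.pyGet? l (k : Int)).getD 0) d) d)
      rw [show ((k : Int) + 1) = ((k + 1 : Nat) : Int) by omega, ihx, hget, pv_mod_mul_right,
        pv_mod_mul_left, hdrop, List.prod_cons, mul_assoc]
    · have hkl : k + 1 = l.length := by omega
      rw [PySem.List.pyRange_one_eq_nil (by omega)]
      simp only [List.foldl_nil]
      rw [hget, pv_mod_mul_right, hdrop, show l.drop (k+1) = [] by rw [List.drop_eq_nil_iff]; omega]
      simp

theorem pv_prod_div_rem (l : List Int) (d : Int) (h : l ≠ []) :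
    prod_div_rem l d = PySem.Int.mod l.prod d := by
  match l with
  | [x] => simp [prod_div_rem, PySem.List.pyGet?, PySem.List.pyIdx?]
  | x :: y :: t =>
    have hlen : (x :: y :: t).length ≠ 0 := by simp
    have hlen1 : (x :: y :: t).length ≠ 1 := by simp
    simp only [prod_div_rem, if_neg hlen, if_neg hlen1]
    have hloop := pv_pdr_loop (x :: y :: t) d ((x :: y :: t).length - 1) 1 rfl (by simp)
      0 (PySem.Int.mod ((PySem.List.pyGet? (x :: y :: t) 0).getD 0) d)
    rw [show ((1 : Nat) : Int) = (1 : Int) by rfl] at hloop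
    rw [hloop]
    have hget0 : (PySem.List.pyGet? (x :: y :: t) 0).getD 0 = x := by
      have h0 : (0 : Int) ≤ (t.length : Int) + 1 := by positivity
      simp [PySem.List.pyGet?, PySem.List.pyIdx?, h0]
    rw [hget0, pv_mod_mul_left]
    simp

-- the per-sublist contribution of B's total
def pvQ (l : List Int) : Int := if l.isEmpty then 0 else l.prod

-- A's per-sublist step (zeta-expanded body of A's fold function)
def pvStepA (d remainder : Int) (l : List Int) : Int :=
  let st := (PySem.List.pyRange 0 l.length 1).foldl
    (fun (st : Int × List Int) index =>
      let v := (PySem.List.pyGet? st.2 index).getD 0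
      if v < 0 then (st.1 * -1, st.2.set index.toNat (v * -1)) else st)
    (1, l)
  let r := prod_div_rem st.2 d
  let remainder := if st.1 = 1 then remainder + r else remainder - r
  PySem.Int.mod remainder d

theorem pv_stepA_q (d t : Int) (l : List Int) :
    pvStepA d t l = PySem.Int.mod (t + pvQ l) d := by
  simp only [pvStepA, pvQ]
  rw [pv_signloop0 l]
  by_cases hl : l = []
  · subst hl
    simp [prod_div_rem, pvSgn, pvAbs]
  · have habs : pvAbs l ≠ [] := by
      simpa [pvAbs] using hl
    have hempty : l.isEmpty = false := by simp [hl]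
    rw [hempty]
    simp only [Bool.false_eq_true, if_false]
    rw [pv_prod_div_rem _ _ habs]
    have hprod := pvSgn_mul_abs_prod l
    rcases pvSgn_pm l with hs | hs
    · rw [hs, one_mul] at hprod
      rw [if_pos hs, pv_mod_add_right, hprod]
    · rw [hs] at hprod
      rw [if_neg (by rw [hs]; decide), pv_mod_sub_right,
          show t - (pvAbs l).prod = t + l.prod by rw [← hprod]; ring]

-- A's fold, started from a reduced accumulator, is the single modulo of the exact sum
theorem pv_foldA (d : Int) (lol : List (List Int)) : ∀ t : Int,
    lol.foldl (pvStepA d) (PySem.Int.mod t d)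
      = PySem.Int.mod (t + (lol.map pvQ).sum) d := by
  induction lol with
  | nil => intro t; simp
  | cons l rest ih =>
    intro t
    rw [List.foldl_cons, pv_stepA_q, pv_mod_add_left, ih (t + pvQ l)]
    simp [add_assoc]

-- B's exact-sum fold
theorem pv_foldB (lol : List (List Int)) : ∀ t : Int,
    lol.foldl (fun (total : Int) l =>
      if l.isEmpty then total else total + l.foldl (fun p x => p * x) 1) t
    = t + (lol.map pvQ).sum := by
  induction lol with
  | nil => intro t; simp
  | cons l rest ih =>
    intro t
    rw [List.foldl_cons, ih]
    by_cases hl : l.isEmpty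
    · simp [pvQ, hl]
    · have hl' : l.isEmpty = false := by simpa using hl
      simp only [hl', Bool.false_eq_true, if_false, List.map_cons, List.sum_cons, pvQ]
      rw [show l.foldl (fun p x => p * x) 1 = l.prod from List.prod_eq_foldl.symm]
      ring

-- ===== VERDICT (by name: the statement is the Claim_ definition above) =====
theorem prod_sum_divisible_spec : Claim_equal_prod_sum_divisible := by
  intro lol d _ _
  have hA : prod_sum_divisible lol d = (lol.foldl (pvStepA d) 0 == 0) := rfl
  have hB : prod_sum_divisible_alt lol d
      = (PySem.Int.mod (lol.foldl (fun (total : Int) l =>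
          if l.isEmpty then total else total + l.foldl (fun p x => p * x) 1) 0) d == 0) := rfl
  unfold Spec_prod_sum_divisible
  have hfa := pv_foldA d lol 0
  rw [pv_mod_zero_left] at hfa
  rw [hA, hB, pv_foldB lol 0, hfa]
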